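-- pv_equiv track=rewrite | github.com/ArtyomKolosov2/PL_labs | lab25/task_decode.py | find_slice_len
-- ===== SOURCE A (Python) =====
-- def find_slice_len(text):
--     if not isinstance(text, str):
--         return None
--     min_index = 0
--     minimum = ord(text[0])
--     for i in range(len(text)):
--         if minimum > ord(text[i]):
--             min_index = i
--             minimum = ord(text[i])
--     return len(text[min_index:])
-- ===== SOURCE B (Python) =====
-- def find_slice_len(text):
--     if not isinstance(text, str):
--         return None
--     # find the minimum character code in one pass (seeded with ord(text[0]),
--     # so the empty string raises IndexError just as in the index-tracking version)
--     minimum = ord(text[0])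
--     for c in text:
--         minimum = min(minimum, ord(c))
--     # then locate its first occurrence and return the suffix length from there
--     return len(text) - text.index(chr(minimum))
-- ===== Notes on version B (the rewrite author's own statement) =====
-- stated objective: simpler
-- what changed: Replaces A's single index-tracking scan (maintaining a (min_index, minimum) pair and taking a slice copy at the end) by two plain passes: compute the minimum character code, then locate its first occurrence with str.index and subtract; no index bookkeeping and no slice copy.
import Mathlib
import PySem

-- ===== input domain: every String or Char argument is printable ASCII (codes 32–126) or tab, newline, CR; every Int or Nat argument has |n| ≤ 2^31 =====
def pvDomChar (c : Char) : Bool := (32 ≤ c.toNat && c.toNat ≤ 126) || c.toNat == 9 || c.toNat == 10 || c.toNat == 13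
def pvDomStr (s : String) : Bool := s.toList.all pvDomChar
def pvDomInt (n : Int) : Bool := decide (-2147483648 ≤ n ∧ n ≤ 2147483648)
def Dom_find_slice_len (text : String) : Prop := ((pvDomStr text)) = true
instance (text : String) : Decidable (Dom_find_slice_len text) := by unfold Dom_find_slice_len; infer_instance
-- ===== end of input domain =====

-- B computes the same suffix length with two plain passes (minimum code, then its first
-- occurrence) instead of A's single index-tracking scan; Pre_ excludes only "" where the
-- Python A raises IndexError on text[0].


-- ===== PORT A =====
-- the for-loop over range(len(text)): state (min_index, minimum), i the loop counter
def pvALoop : List Char → Nat → Nat × Nat → Nat × Nat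
  | [], _, st => st
  | c :: rest, i, st =>
      pvALoop rest (i + 1) (if st.2 > c.toNat then (i, c.toNat) else st)

def find_slice_len (text : String) : Int :=
  match text.toList with
  | [] => 0  -- ord(text[0]) raises IndexError in Python; excluded by Pre_
  | c0 :: _ =>
    let st := pvALoop text.toList 0 (0, c0.toNat)
    -- len(text[min_index:])
    (((text.toList).drop st.1).length : Int)

-- ===== PORT B =====
def find_slice_len_alt (text : String) : Int :=
  match text.toList with
  | [] => 0  -- ord(text[0]) raises IndexError in Python; excluded by Pre_
  | c0 :: _ =>
    -- pass 1: minimum = min(minimum, ord(c)) over the string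
    let m := text.toList.foldl (fun acc c => Nat.min acc c.toNat) c0.toNat
    -- pass 2: text.index(chr(minimum))  (always found, so the getD default is unreachable)
    let i := (PySem.List.index? text.toList (Char.ofNat m)).getD 0
    (text.toList.length : Int) - (i : Int)

-- ===== PRECONDITION & SPEC =====
-- Pre_ excludes only the empty string, on which the Python A (and B) raise IndexError.
def Pre_find_slice_len (text : String) : Prop := text ≠ ""
instance (text : String) : Decidable (Pre_find_slice_len text) := by unfold Pre_find_slice_len; infer_instance
def pvWitness_find_slice_len : String := "ba"

def Spec_find_slice_len (text : String) (out : Int) : Prop := out = find_slice_len_alt text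
instance (text : String) (out : Int) : Decidable (Spec_find_slice_len text out) := by unfold Spec_find_slice_len; infer_instance

-- ===== CLAIM (what is proved, stated in full; the proofs are below) =====
def Claim_equal_find_slice_len : Prop := ∀ (text : String), Dom_find_slice_len text → Pre_find_slice_len text → Spec_find_slice_len text (find_slice_len text)

-- ===== LEMMAS AND PROOFS =====

-- the minimum-fold of B, named for the lemmas
def pvFMin (cs : List Char) (v : Nat) : Nat := cs.foldl (fun acc c => Nat.min acc c.toNat) v

theorem pvFMin_cons (c : Char) (rest : List Char) (v : Nat) :
    pvFMin (c :: rest) v = pvFMin rest (Nat.min v c.toNat) := rfl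

theorem pvFMin_le (cs : List Char) (v : Nat) : pvFMin cs v ≤ v ∧ ∀ c ∈ cs, pvFMin cs v ≤ c.toNat := by
  induction cs generalizing v with
  | nil => simp [pvFMin]
  | cons c rest ih =>
    have h := ih (Nat.min v c.toNat)
    rw [pvFMin_cons]
    refine ⟨le_trans h.1 (Nat.min_le_left _ _), ?_⟩
    intro d hd
    rcases List.mem_cons.mp hd with rfl | hd
    · exact le_trans h.1 (Nat.min_le_right _ _)
    · exact h.2 _ hd

theorem pvFMin_att (cs : List Char) (v : Nat) : pvFMin cs v = v ∨ ∃ c ∈ cs, pvFMin cs v = c.toNat := by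
  induction cs generalizing v with
  | nil => left; rfl
  | cons c rest ih =>
    rw [pvFMin_cons]
    rcases ih (Nat.min v c.toNat) with h | ⟨d, hd, h⟩
    · by_cases hv : v ≤ c.toNat
      · left; rw [h]; unfold Nat.min; omega
      · right; exact ⟨c, by simp, by rw [h]; unfold Nat.min; omega⟩
    · right; exact ⟨d, by simp [hd], h⟩

-- characterization of A's loop: it returns the overall minimum together with the index of
-- its first occurrence (or keeps the seed index when nothing is strictly smaller)
theorem pvALoop_eq (cs : List Char) (i bi bv : Nat) :
    pvALoop cs i (bi, bv) =
      ((if pvFMin cs bv < bv then i + cs.findIdx (fun c => c.toNat ≤ pvFMin cs bv) else bi),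
        pvFMin cs bv) := by
  induction cs generalizing i bi bv with
  | nil => simp [pvALoop, pvFMin]
  | cons c rest ih =>
    by_cases hc : c.toNat < bv
    · have hstep : pvALoop (c :: rest) i (bi, bv) = pvALoop rest (i + 1) (i, c.toNat) := by
        simp [pvALoop, hc]
      have hm : pvFMin (c :: rest) bv = pvFMin rest c.toNat := by
        rw [pvFMin_cons]; exact congrArg (pvFMin rest) (by unfold Nat.min; omega)
      have hle := (pvFMin_le rest c.toNat).1
      rw [hstep, ih, hm, List.findIdx_cons]
      by_cases h2 : pvFMin rest c.toNat < c.toNat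
      · have hlt : pvFMin rest c.toNat < bv := lt_trans h2 hc
        have hnle : ¬ (c.toNat ≤ pvFMin rest c.toNat) := by omega
        simp [h2, hlt, hnle]
        omega
      · have heq : pvFMin rest c.toNat = c.toNat := le_antisymm hle (not_lt.mp h2)
        have hlt : pvFMin rest c.toNat < bv := by omega
        have hcle : c.toNat ≤ pvFMin rest c.toNat := le_of_eq heq.symm
        simp [h2, hlt, hcle]
    · have hstep : pvALoop (c :: rest) i (bi, bv) = pvALoop rest (i + 1) (bi, bv) := by
        simp [pvALoop, hc]
      have hm : pvFMin (c :: rest) bv = pvFMin rest bv := by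
        rw [pvFMin_cons]; exact congrArg (pvFMin rest) (by unfold Nat.min; omega)
      rw [hstep, ih, hm, List.findIdx_cons]
      by_cases h2 : pvFMin rest bv < bv
      · have hnle : ¬ (c.toNat ≤ pvFMin rest bv) := by omega
        simp [h2, hnle]
        omega
      · simp [h2]

-- first occurrence of the minimum: index? of chr(m) is findIdx of (code ≤ m)
theorem pvIndex_min (cs : List Char) (m : Nat)
    (hatt : ∃ c ∈ cs, c.toNat = m) (hlb : ∀ c ∈ cs, m ≤ c.toNat) :
    PySem.List.index? cs (Char.ofNat m) = some (cs.findIdx (fun c => c.toNat ≤ m)) := by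
  induction cs with
  | nil => simp at hatt
  | cons c rest ih =>
    by_cases hc : c.toNat = m
    · have hco : Char.ofNat m = c := by rw [← hc]; exact Char.ofNat_toNat c
      rw [hco, PySem.List.index?_cons_self, List.findIdx_cons]
      simp [hc]
    · rcases hatt with ⟨d, hd, hdm⟩
      rcases List.mem_cons.mp hd with rfl | hd
      · exact absurd hdm hc
      · have hdne : c ≠ Char.ofNat m := by
          have hco : Char.ofNat m = d := by rw [← hdm]; exact Char.ofNat_toNat d
          rw [hco]
          intro he
          exact hc (by rw [he, hdm])
        rw [PySem.List.index?_cons_of_ne rest hdne,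
            ih ⟨d, hd, hdm⟩ (fun e he => hlb e (by simp [he])), List.findIdx_cons]
        have hnle : ¬ (c.toNat ≤ m) := by
          have := hlb c (by simp)
          omega
        simp [hnle]

theorem pvFindIdx_lt (cs : List Char) (m : Nat) (hatt : ∃ c ∈ cs, c.toNat = m) :
    cs.findIdx (fun c => c.toNat ≤ m) < cs.length := by
  rcases hatt with ⟨c, hc, hm⟩
  exact List.findIdx_lt_length_of_exists ⟨c, hc, by simp [hm]⟩

-- ===== VERDICT (by name: the statement is the Claim_ definition above) =====
theorem find_slice_len_spec : Claim_equal_find_slice_len := by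
  intro text _ hpre
  unfold Spec_find_slice_len find_slice_len find_slice_len_alt
  cases h : text.toList with
  | nil => exact absurd (String.toList_eq_nil_iff.mp h) hpre
  | cons c0 rest =>
    have hle := pvFMin_le (c0 :: rest) c0.toNat
    have hatt : ∃ c ∈ (c0 :: rest), c.toNat = pvFMin (c0 :: rest) c0.toNat := by
      rcases pvFMin_att (c0 :: rest) c0.toNat with he | ⟨c, hc, he⟩
      · exact ⟨c0, by simp, he.symm⟩
      · exact ⟨c, hc, he.symm⟩
    have hidx := pvIndex_min (c0 :: rest) _ hatt hle.2
    have hg := pvFindIdx_lt (c0 :: rest) _ hatt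
    have hfold : (c0 :: rest).foldl (fun acc c => Nat.min acc c.toNat) c0.toNat
        = pvFMin (c0 :: rest) c0.toNat := rfl
    have hfst : (pvALoop (c0 :: rest) 0 (0, c0.toNat)).1
        = (c0 :: rest).findIdx (fun c => c.toNat ≤ pvFMin (c0 :: rest) c0.toNat) := by
      rw [pvALoop_eq]
      by_cases h2 : pvFMin (c0 :: rest) c0.toNat < c0.toNat
      · simp [h2]
      · have heq : pvFMin (c0 :: rest) c0.toNat = c0.toNat := le_antisymm hle.1 (not_lt.mp h2)
        have hcle : c0.toNat ≤ pvFMin (c0 :: rest) c0.toNat := le_of_eq heq.symm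
        rw [if_neg h2, List.findIdx_cons]
        simp [hcle]
    simp only [hfold, hfst, hidx, Option.getD_some, List.length_drop]
    omega
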